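-- pv_equiv track=rewrite | github.com/PydaVi/rastro | src/planner/strategic_prompting.py | _select_resources
-- ===== SOURCE A (Python) =====
-- _PRIORITY_TYPES = {"identity.role", "identity.user"}
--
-- _DATA_TYPES = {
--     "data_store.s3_bucket",
--     "data_store.s3_object",
--     "secret.secrets_manager",
--     "secret.ssm_parameter",
--     "compute.ec2_instance",
--     "compute.lambda_function",
--     "crypto.kms_key",
-- }
--
-- def _select_resources(resources: list[dict], limit: int) -> list[dict]:
--     priority = [r for r in resources if r.get("resource_type") in _PRIORITY_TYPES]
--     data = [r for r in resources if r.get("resource_type") in _DATA_TYPES]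
--     rest = [
--         r
--         for r in resources
--         if r.get("resource_type") not in _PRIORITY_TYPES | _DATA_TYPES
--     ]
--     ordered = priority + data + rest
--     return ordered[:limit]
-- ===== SOURCE B (Python) =====
-- _PRIORITY_TYPES = {"identity.role", "identity.user"}
--
-- _DATA_TYPES = {
--     "data_store.s3_bucket",
--     "data_store.s3_object",
--     "secret.secrets_manager",
--     "secret.ssm_parameter",
--     "compute.ec2_instance",
--     "compute.lambda_function",
--     "crypto.kms_key",
-- }
--
--
-- def _rank(r: dict) -> int:
--     t = r.get("resource_type")
--     if t in _PRIORITY_TYPES: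
--         return 0
--     if t in _DATA_TYPES:
--         return 1
--     return 2
--
--
-- def _select_resources(resources: list[dict], limit: int) -> list[dict]:
--     return sorted(resources, key=_rank)[:limit]
-- ===== Notes on version B (the rewrite author's own statement) =====
-- stated objective: idiomatic
-- what changed: Replaces the three filtering passes and concatenation with a single stable sort by a 3-valued rank key (0 priority, 1 data, 2 rest) followed by a slice; stability preserves within-bucket order.
import Mathlib
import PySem

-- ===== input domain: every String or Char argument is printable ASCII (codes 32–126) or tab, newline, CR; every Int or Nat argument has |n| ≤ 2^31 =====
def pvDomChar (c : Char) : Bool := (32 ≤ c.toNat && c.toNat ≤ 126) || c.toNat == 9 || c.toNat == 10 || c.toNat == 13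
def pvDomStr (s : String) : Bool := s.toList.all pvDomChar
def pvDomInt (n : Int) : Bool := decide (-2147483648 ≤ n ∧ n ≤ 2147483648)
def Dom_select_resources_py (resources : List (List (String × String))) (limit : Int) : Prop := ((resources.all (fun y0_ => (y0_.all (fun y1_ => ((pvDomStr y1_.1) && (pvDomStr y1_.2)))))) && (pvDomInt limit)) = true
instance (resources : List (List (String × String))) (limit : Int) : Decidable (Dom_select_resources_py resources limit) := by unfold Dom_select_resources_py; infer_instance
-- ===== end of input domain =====

-- B replaces A's three filtering passes + concatenation by one stable sort under a
-- 3-valued rank key and a slice (idiomatic rewrite, same results, not faster).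

-- module constants, shared by both versions (Python's _PRIORITY_TYPES, _DATA_TYPES)
def pvPrioritySet : PySem.Set String := PySem.Set.ofList ["identity.role", "identity.user"]

def pvDataSet : PySem.Set String :=
  PySem.Set.ofList ["data_store.s3_bucket", "data_store.s3_object", "secret.secrets_manager",
    "secret.ssm_parameter", "compute.ec2_instance", "compute.lambda_function", "crypto.kms_key"]

-- r.get("resource_type") : first-match lookup in the association list
def pvGetType (r : List (String × String)) : Option String := List.lookup "resource_type" r

-- `o in s` for o : Optional[str], s a set of strings (None is never a member)
def pvOptIn (o : Option String) (s : PySem.Set String) : Bool :=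
  match o with
  | some t => s.contains t
  | none => false

-- ===== PORT A =====
def select_resources_py (resources : List (List (String × String))) (limit : Int) :
    List (List (String × String)) :=
  let priority := resources.filter (fun r => pvOptIn (pvGetType r) pvPrioritySet)
  let data := resources.filter (fun r => pvOptIn (pvGetType r) pvDataSet)
  let rest := resources.filter (fun r => !(pvOptIn (pvGetType r) (PySem.Set.union pvPrioritySet pvDataSet)))
  let ordered := priority ++ data ++ rest
  PySem.List.slice ordered none (some limit)

-- ===== PORT B =====
def pvRank (r : List (String × String)) : Int :=
  if pvOptIn (pvGetType r) pvPrioritySet then 0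
  else if pvOptIn (pvGetType r) pvDataSet then 1
  else 2

def select_resources_py_alt (resources : List (List (String × String))) (limit : Int) :
    List (List (String × String)) :=
  PySem.List.slice (PySem.List.sorted resources pvRank) none (some limit)

-- ===== PRECONDITION & SPEC =====
def Spec_select_resources_py (resources : List (List (String × String))) (limit : Int) (out : List (List (String × String))) : Prop := out = select_resources_py_alt resources limit
instance (resources : List (List (String × String))) (limit : Int) (out : List (List (String × String))) : Decidable (Spec_select_resources_py resources limit out) := by unfold Spec_select_resources_py; infer_instance

-- ===== CLAIM (what is proved, stated in full; the proofs are below) =====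
def Claim_equal_select_resources_py : Prop := ∀ (resources : List (List (String × String))) (limit : Int), Dom_select_resources_py resources limit → Spec_select_resources_py resources limit (select_resources_py resources limit)

-- ===== LEMMAS AND PROOFS =====

-- inserting x into l1 ++ l2 when x goes after all of l1 and before all of l2
theorem insertBy_mid {α : Type} (bef : α → α → Bool) (x : α) (l1 l2 : List α)
    (h2 : ∀ y ∈ l2, bef x y = true) :
    ∀ _ : ∀ y ∈ l1, bef x y = false,
      PySem.List.insertBy bef x (l1 ++ l2) = l1 ++ x :: l2 := by
  induction l1 with
  | nil =>
    intro _
    cases l2 with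
    | nil => simp [PySem.List.insertBy]
    | cons y ys => simp [PySem.List.insertBy, h2 y (by simp)]
  | cons z l1 ih =>
    intro h1
    simp only [List.cons_append, PySem.List.insertBy, h1 z (by simp)]
    simp only [Bool.false_eq_true, if_false, List.cons.injEq, true_and]
    exact ih (fun y hy => h1 y (by simp [hy]))

-- a stable sort under a key with values in {0,1,2} is the concatenation of the
-- three key-buckets, each in original order
theorem sorted_three {α : Type} (key : α → Int)
    (hk : ∀ x : α, key x = 0 ∨ key x = 1 ∨ key x = 2) (xs : List α) :
    PySem.List.sorted xs key =
      xs.filter (fun x => key x == 0) ++ xs.filter (fun x => key x == 1) ++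
        xs.filter (fun x => key x == 2) := by
  rw [PySem.List.sorted_eq_foldl_insertBy]
  induction xs using List.reverseRecOn with
  | nil => simp
  | append_singleton xs x ih =>
    rw [List.foldl_append, List.foldl_cons, List.foldl_nil, ih]
    simp only [List.filter_append, List.filter_cons, List.filter_nil]
    rcases hk x with h | h | h
    · rw [List.append_assoc,
        insertBy_mid _ x _ _
          (fun y hy => by
            rcases List.mem_append.mp hy with hy | hy <;>
              · have := (List.mem_filter.mp hy).2; simp at this; simp [this, h])
          (fun y hy => by
            have := (List.mem_filter.mp hy).2; simp at this; simp [this, h])]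
      simp [h]
    · rw [insertBy_mid _ x _ _
          (fun y hy => by
            have := (List.mem_filter.mp hy).2; simp at this; simp [this, h])
          (fun y hy => by
            rcases List.mem_append.mp hy with hy | hy <;>
              · have := (List.mem_filter.mp hy).2; simp at this; simp [this, h])]
      simp [h, List.append_assoc]
    · rw [← List.append_nil (_ ++ _ ++ _),
        insertBy_mid _ x _ _ (fun y hy => by simp at hy)
          (fun y hy => by
            rcases List.mem_append.mp hy with hy | hy
            · rcases List.mem_append.mp hy with hy | hy <;>
                · have := (List.mem_filter.mp hy).2; simp at this; simp [this, h]
            · have := (List.mem_filter.mp hy).2; simp at this; simp [this, h])]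
      simp [h]

theorem pvRank_vals (r : List (String × String)) :
    pvRank r = 0 ∨ pvRank r = 1 ∨ pvRank r = 2 := by
  unfold pvRank; split_ifs <;> simp

-- the two concrete type sets are disjoint
theorem pv_disjoint (t : String) (hp : pvPrioritySet.contains t = true) :
    pvDataSet.contains t = false := by
  have hp' : t = "identity.role" ∨ t = "identity.user" := by
    simpa [pvPrioritySet, PySem.Set.ofList, PySem.Set.add, PySem.Set.contains,
      PySem.Set.empty] using hp
  rcases hp' with h | h <;> subst h <;> decide

-- membership in the union of the two concrete sets is the disjunction
theorem pv_union_contains (t : String) :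
    (PySem.Set.union pvPrioritySet pvDataSet).contains t =
      (pvPrioritySet.contains t || pvDataSet.contains t) := by
  have hu : PySem.Set.union pvPrioritySet pvDataSet =
      (["identity.role", "identity.user", "data_store.s3_bucket", "data_store.s3_object",
        "secret.secrets_manager", "secret.ssm_parameter", "compute.ec2_instance",
        "compute.lambda_function", "crypto.kms_key"] : List String) := by decide
  rw [hu]
  simp [pvPrioritySet, pvDataSet, PySem.Set.ofList, PySem.Set.add, PySem.Set.contains,
    PySem.Set.empty, Bool.or_assoc]

-- rank 0 is exactly A's priority test
theorem pvRank_eq_zero (r : List (String × String)) :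
    (pvRank r == 0) = pvOptIn (pvGetType r) pvPrioritySet := by
  unfold pvRank; split_ifs with h1 h2 <;> simp [h1]

-- rank 1 is exactly A's data test (uses disjointness of the two sets)
theorem pvRank_eq_one (r : List (String × String)) :
    (pvRank r == 1) = pvOptIn (pvGetType r) pvDataSet := by
  unfold pvRank
  by_cases h1 : pvOptIn (pvGetType r) pvPrioritySet
  · cases ho : pvGetType r with
    | none => rw [ho] at h1; simp [pvOptIn] at h1
    | some t =>
      rw [ho] at h1; simp only [pvOptIn] at h1 ⊢
      have hd := pv_disjoint t h1
      simp only [PySem.Set.contains, List.contains_eq_mem, decide_eq_true_eq] at h1 hd ⊢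
      simp [h1, hd]
  · by_cases h2 : pvOptIn (pvGetType r) pvDataSet <;> simp [h1, h2]

-- rank 2 is exactly A's rest test
theorem pvRank_eq_two (r : List (String × String)) :
    (pvRank r == 2) = !(pvOptIn (pvGetType r) (PySem.Set.union pvPrioritySet pvDataSet)) := by
  have hu : pvOptIn (pvGetType r) (PySem.Set.union pvPrioritySet pvDataSet) =
      (pvOptIn (pvGetType r) pvPrioritySet || pvOptIn (pvGetType r) pvDataSet) := by
    cases pvGetType r with
    | none => simp [pvOptIn]
    | some t => simp only [pvOptIn]; exact pv_union_contains t
  rw [hu]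
  unfold pvRank
  by_cases h1 : pvOptIn (pvGetType r) pvPrioritySet
  · simp [h1]
  · by_cases h2 : pvOptIn (pvGetType r) pvDataSet <;> simp [h1, h2]

-- ===== VERDICT (by name: the statement is the Claim_ definition above) =====
theorem select_resources_py_spec : Claim_equal_select_resources_py := by
  intro resources limit _
  show _ = _
  unfold select_resources_py select_resources_py_alt
  rw [sorted_three pvRank pvRank_vals]
  simp only [pvRank_eq_zero, pvRank_eq_one, pvRank_eq_two]
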